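-- pv_equiv track=rewrite | github.com/Steelbirdy/PatbotV3 | cogs/dnd/lib/dnd/display/utils.py | add_backticks_as_needed
-- ===== SOURCE A (Python) =====
-- def add_backticks_as_needed(texts: list) -> list:
--     add_to_next = False
--     ret = []
--     for t in texts:
--         if add_to_next:
--             t = '```' + t
--             add_to_next = False
--         if t.count('```') % 2:
--             t += '```'
--             add_to_next = True
--         ret.append(t)
--     return ret
-- ===== SOURCE B (Python) =====
-- def add_backticks_as_needed(texts: list) -> list:
--     # table pass 1: per-text fence parity; pass 2: cumulative open-state table;
--     # pass 3: closed-form wrap of each fragment from the table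
--     par = [t.count('```') % 2 for t in texts]
--     o = [0]
--     for p in par:
--         o.append((o[-1] + p) % 2)
--     return [('```' if o[i] else '') + texts[i] + ('```' if o[i + 1] else '')
--             for i in range(len(texts))]
-- ===== Notes on version B (the rewrite author's own statement) =====
-- stated objective: alternative
-- what changed: Replaces the stateful carry-a-flag loop that edits each fragment in flight by three separate table passes: a per-fragment fence-parity list, a cumulative open-state prefix table, and a closed-form wrapping pass that decides each fragment's fences independently from the table.
import Mathlib
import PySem

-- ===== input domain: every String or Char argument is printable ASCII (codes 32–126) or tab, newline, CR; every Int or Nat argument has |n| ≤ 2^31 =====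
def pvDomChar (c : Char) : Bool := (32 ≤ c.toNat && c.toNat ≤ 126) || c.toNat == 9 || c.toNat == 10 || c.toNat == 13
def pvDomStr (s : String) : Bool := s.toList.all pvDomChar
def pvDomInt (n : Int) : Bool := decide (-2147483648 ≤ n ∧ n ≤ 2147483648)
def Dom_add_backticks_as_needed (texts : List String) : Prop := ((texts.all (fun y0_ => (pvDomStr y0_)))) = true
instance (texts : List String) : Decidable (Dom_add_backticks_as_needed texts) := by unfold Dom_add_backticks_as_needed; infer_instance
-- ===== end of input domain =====

-- B replaces A's stateful carry-a-flag loop by a closed-form mapping pass over indices,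
-- deciding each wrap from precomputed fence-parity prefix sums (objective: alternative decomposition).

-- ===== PORT A =====
def add_backticks_as_needed (texts : List String) : List String :=
  (texts.foldl (fun (st : Bool × List String) t =>
      let t1 := if st.1 then "```" ++ t else t
      let add_to_next := if st.1 then false else st.1
      if PySem.Str.count t1 "```" % 2 ≠ 0 then (true, st.2 ++ [t1 ++ "```"])
      else (add_to_next, st.2 ++ [t1])
    ) (false, ([] : List String))).2

-- ===== PORT B =====
def add_backticks_as_needed_alt (texts : List String) : List String :=
  let par := texts.map (fun t => PySem.Str.count t "```" % 2)
  -- o[-1] on the always-nonempty o is ported as getLastD 0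
  let o := par.foldl (fun o p => o ++ [(o.getLastD 0 + p) % 2]) ([0] : List Nat)
  (List.range texts.length).map (fun i =>
    (if o.getD i 0 ≠ 0 then "```" else "") ++ texts.getD i "" ++
    (if o.getD (i + 1) 0 ≠ 0 then "```" else ""))

-- ===== PRECONDITION & SPEC =====
def Spec_add_backticks_as_needed (texts : List String) (out : List String) : Prop := out = add_backticks_as_needed_alt texts
instance (texts : List String) (out : List String) : Decidable (Spec_add_backticks_as_needed texts out) := by unfold Spec_add_backticks_as_needed; infer_instance

-- ===== CLAIM (what is proved, stated in full; the proofs are below) =====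
def Claim_equal_add_backticks_as_needed : Prop := ∀ (texts : List String), Dom_add_backticks_as_needed texts → Spec_add_backticks_as_needed texts (add_backticks_as_needed texts)

-- ===== LEMMAS AND PROOFS =====

-- the three-backtick pattern as a character list
def pvBt : List Char := ['`', '`', '`']

-- per-text fence parity
def pvPc (t : String) : Nat := PySem.Str.count t "```" % 2

-- common recursive specification: c is the number of fences seen so far (mod-2 relevant)
def pvSpecC : Nat → List String → List String
  | _, [] => []
  | c, t :: ts =>
      ((if c % 2 ≠ 0 then "```" else "") ++ t ++ (if (c + pvPc t) % 2 ≠ 0 then "```" else ""))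
        :: pvSpecC (c + pvPc t) ts

theorem pv_go_acc (sub : List Char) (fuel : Nat) (s : List Char) (acc : Nat) :
    PySem.Chars.count.go sub fuel s acc = acc + PySem.Chars.count.go sub fuel s 0 := by
  induction fuel generalizing s acc with
  | zero => simp [PySem.Chars.count.go]
  | succ n ih =>
    cases s with
    | nil => simp [PySem.Chars.count.go]
    | cons h t =>
      rw [PySem.Chars.count.go, PySem.Chars.count.go]
      split
      · rw [ih _ (acc + 1), ih _ 1]; omega
      · exact ih _ _

theorem pv_go_congr (sub : List Char) (hs : 1 ≤ sub.length) : ∀ (n : Nat) (s : List Char) (f1 f2 acc : Nat),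
    s.length ≤ n → s.length ≤ f1 → s.length ≤ f2 →
    PySem.Chars.count.go sub f1 s acc = PySem.Chars.count.go sub f2 s acc := by
  intro n
  induction n with
  | zero =>
    intro s f1 f2 acc h1 _ _
    have : s = [] := List.eq_nil_of_length_eq_zero (Nat.le_zero.mp h1)
    subst this
    cases f1 <;> cases f2 <;> simp [PySem.Chars.count.go]
  | succ n ih =>
    intro s f1 f2 acc h1 h2 h3
    cases s with
    | nil => cases f1 <;> cases f2 <;> simp [PySem.Chars.count.go]
    | cons h t =>
      obtain ⟨g1, rfl⟩ : ∃ g1, f1 = g1 + 1 := ⟨f1 - 1, by simp at h2; omega⟩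
      obtain ⟨g2, rfl⟩ : ∃ g2, f2 = g2 + 1 := ⟨f2 - 1, by simp at h3; omega⟩
      rw [PySem.Chars.count.go, PySem.Chars.count.go]
      split
      · apply ih <;> simp at h1 h2 h3 ⊢ <;> omega
      · apply ih <;> simp at h1 h2 h3 ⊢ <;> omega

theorem pv_count_bt_append (l : List Char) :
    PySem.Chars.count (pvBt ++ l) pvBt = 1 + PySem.Chars.count l pvBt := by
  show PySem.Chars.count.go pvBt (pvBt ++ l).length (pvBt ++ l) 0
      = 1 + PySem.Chars.count.go pvBt l.length l 0
  have hc : pvBt ++ l = '`' :: '`' :: '`' :: l := rfl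
  rw [hc]
  have hlen : ('`' :: '`' :: '`' :: l).length = (l.length + 2) + 1 := by simp
  rw [hlen, PySem.Chars.count.go]
  have hpre : pvBt.isPrefixOf ('`' :: '`' :: '`' :: l) = true := by simp [pvBt, List.isPrefixOf]
  rw [if_pos hpre]
  have hdrop : List.drop pvBt.length ('`' :: '`' :: '`' :: l) = l := rfl
  rw [hdrop, pv_go_acc,
    pv_go_congr pvBt (by simp [pvBt]) l.length l (l.length + 2) l.length 0 le_rfl (by omega) le_rfl]

theorem pv_count_prepend (t : String) :
    PySem.Str.count ("```" ++ t) "```" = 1 + PySem.Str.count t "```" := by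
  show PySem.Chars.count ("```" ++ t).toList ("```".toList) = 1 + PySem.Chars.count t.toList ("```".toList)
  have h1 : ("```" ++ t).toList = pvBt ++ t.toList := by simp [pvBt]
  have h2 : ("```".toList) = pvBt := rfl
  rw [h1, h2, pv_count_bt_append]

-- the open-state table built by B's accumulation loop, characterised recursively
def pvOList (c : Nat) : List Nat → List Nat
  | [] => []
  | p :: ps => ((c + p) % 2) :: pvOList ((c + p) % 2) ps

theorem pv_ofold (par : List Nat) : ∀ (front : List Nat) (c : Nat),
    par.foldl (fun o p => o ++ [(o.getLastD 0 + p) % 2]) (front ++ [c])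
      = front ++ [c] ++ pvOList c par := by
  induction par with
  | nil => intro front c; simp [pvOList]
  | cons p ps ih =>
    intro front c
    rw [List.foldl_cons]
    have hlast : (front ++ [c]).getLastD 0 = c := by simp
    rw [hlast, show front ++ [c] ++ [(c + p) % 2] = (front ++ [c]) ++ [(c + p) % 2] from rfl,
      ih (front ++ [c]) ((c + p) % 2)]
    simp [pvOList]

theorem pv_specC_congr (ts : List String) : ∀ (a b : Nat), a % 2 = b % 2 →
    pvSpecC a ts = pvSpecC b ts := by
  induction ts with
  | nil => intro a b _; rfl
  | cons t ts ih =>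
    intro a b hab
    unfold pvSpecC
    have h1 : (a + pvPc t) % 2 = (b + pvPc t) % 2 := by omega
    rw [hab, h1, ih (a + pvPc t) (b + pvPc t) h1]

-- B's mapping pass over the open-state table computes pvSpecC
theorem pv_alt_general (ts : List String) : ∀ (c : Nat), c % 2 = c →
    (List.range ts.length).map (fun i =>
      (if (c :: pvOList c (ts.map pvPc)).getD i 0 ≠ 0 then "```" else "") ++ ts.getD i "" ++
      (if (c :: pvOList c (ts.map pvPc)).getD (i + 1) 0 ≠ 0 then "```" else ""))
    = pvSpecC c ts := by
  induction ts with
  | nil => intro c _; simp [pvSpecC]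
  | cons t ts ih =>
    intro c hc
    rw [List.length_cons, List.range_succ_eq_map, List.map_cons, List.map_map]
    have hrec : pvSpecC c (t :: ts)
        = ((if c % 2 ≠ 0 then "```" else "") ++ t ++ (if (c + pvPc t) % 2 ≠ 0 then "```" else ""))
          :: pvSpecC (c + pvPc t) ts := rfl
    rw [hrec]
    congr 1
    · simp [List.map_cons, pvOList, hc]
    · rw [← pv_specC_congr ts ((c + pvPc t) % 2) (c + pvPc t) (by omega),
        ← ih ((c + pvPc t) % 2) (by omega)]
      apply List.map_congr_left
      intro i _
      simp only [Function.comp_apply, List.map_cons, pvOList, List.getD_cons_succ]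

theorem pv_alt_eq (texts : List String) : add_backticks_as_needed_alt texts = pvSpecC 0 texts := by
  have hfold : (texts.map pvPc).foldl (fun o p => o ++ [(o.getLastD 0 + p) % 2]) ([0] : List Nat)
      = 0 :: pvOList 0 (texts.map pvPc) := by
    have h := pv_ofold (texts.map pvPc) [] 0
    simpa using h
  show (List.range texts.length).map (fun i =>
      (if ((texts.map (fun t => PySem.Str.count t "```" % 2)).foldl
            (fun o p => o ++ [(o.getLastD 0 + p) % 2]) ([0] : List Nat)).getD i 0 ≠ 0
        then "```" else "") ++ texts.getD i "" ++
      (if ((texts.map (fun t => PySem.Str.count t "```" % 2)).foldl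
            (fun o p => o ++ [(o.getLastD 0 + p) % 2]) ([0] : List Nat)).getD (i + 1) 0 ≠ 0
        then "```" else "")) = pvSpecC 0 texts
  rw [show (fun t : String => PySem.Str.count t "```" % 2) = pvPc from rfl, hfold,
    pv_alt_general texts 0 rfl]

-- A's loop step, named so the induction can rewrite one unfolding at a time
def pvStep (st : Bool × List String) (t : String) : Bool × List String :=
  let t1 := if st.1 then "```" ++ t else t
  let add_to_next := if st.1 then false else st.1
  if PySem.Str.count t1 "```" % 2 ≠ 0 then (true, st.2 ++ [t1 ++ "```"])
  else (add_to_next, st.2 ++ [t1])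

theorem pv_a_general (ts : List String) : ∀ (c : Nat) (acc : List String),
    (ts.foldl pvStep (decide (c % 2 ≠ 0), acc)).2 = acc ++ pvSpecC c ts := by
  induction ts with
  | nil => intro c acc; simp [pvSpecC]
  | cons t ts ih =>
    intro c acc
    rw [List.foldl_cons]
    have hcntC : PySem.Chars.count ('`' :: '`' :: '`' :: t.toList) ['`', '`', '`']
        = 1 + PySem.Chars.count t.toList ['`', '`', '`'] := by
      have h := pv_count_prepend t
      simpa using h
    by_cases hc : c % 2 = 0
    · have hb : decide (c % 2 ≠ 0) = false := by simp [hc]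
      rw [hb]
      by_cases hodd : PySem.Chars.count t.toList ['`', '`', '`'] % 2 = 0
      · have hstep : pvStep (false, acc) t = (decide ((c + pvPc t) % 2 ≠ 0), acc ++ [t]) := by
          simp [pvStep, pvPc, hodd, hc]
        rw [hstep, ih]
        simp [pvSpecC, pvPc, hodd, hc]
      · have hodd1 : PySem.Chars.count t.toList ['`', '`', '`'] % 2 = 1 := by omega
        have hstep : pvStep (false, acc) t
            = (decide ((c + pvPc t) % 2 ≠ 0), acc ++ [t ++ "```"]) := by
          simp [pvStep, pvPc, hodd1]
          omega
        rw [hstep, ih]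
        simp [pvSpecC, pvPc, hodd1, hc]
        omega
    · have hc1 : c % 2 = 1 := by omega
      have hb : decide (c % 2 ≠ 0) = true := by simp [hc]
      rw [hb]
      by_cases hodd : PySem.Chars.count t.toList ['`', '`', '`'] % 2 = 0
      · have hstep : pvStep (true, acc) t
            = (decide ((c + pvPc t) % 2 ≠ 0), acc ++ ["```" ++ t ++ "```"]) := by
          simp [pvStep, pvPc, hcntC, hodd, hc1, Nat.add_mod, String.append_assoc]
        rw [hstep, ih]
        simp [pvSpecC, pvPc, hodd, hc1]
      · have hodd1 : PySem.Chars.count t.toList ['`', '`', '`'] % 2 = 1 := by omega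
        have hstep : pvStep (true, acc) t
            = (decide ((c + pvPc t) % 2 ≠ 0), acc ++ ["```" ++ t]) := by
          simp [pvStep, pvPc, hcntC, hodd1, hc1, Nat.add_mod]
        rw [hstep, ih]
        simp [pvSpecC, pvPc, hodd1, hc1, Nat.add_mod]

theorem pv_a_eq (texts : List String) : add_backticks_as_needed texts = pvSpecC 0 texts := by
  have h := pv_a_general texts 0 []
  simpa using h

-- ===== VERDICT (by name: the statement is the Claim_ definition above) =====
theorem add_backticks_as_needed_spec : Claim_equal_add_backticks_as_needed := by
  intro texts _
  unfold Spec_add_backticks_as_needed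
  rw [pv_a_eq, pv_alt_eq]
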